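-- pv_equiv track=rewrite | github.com/Miron-Anosov/console_test | src/console_core/utils/ioconsole.py | _make_menu_data
-- ===== SOURCE A (Python) =====
-- def _make_menu_data(data: tuple) -> str:
--     """Format menu items for display."""
--     text_to_display = ""
--     for index, text in enumerate(data, 1):
--         if index % 2 != 0 and index == len(data):
--             text_to_display = "".join((text_to_display, f"{text:^55}"))
--         elif index % 2 != 0:
--             text_to_display = "".join((text_to_display, f"{text:^35}"))
--         else:
--             text_to_display = "".join((text_to_display, f"{text}\n"))
--
--     return text_to_display.rstrip("\n")
-- ===== SOURCE B (Python) =====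
-- def _make_menu_data(data: tuple) -> str:
--     """Format menu items for display: pairwise pass over two-column rows."""
--     parts = []
--     n = len(data)
--     i = 0
--     while i < n:
--         if i == n - 1:
--             parts.append(f"{data[i]:^55}")
--         else:
--             parts.append(f"{data[i]:^35}")
--             parts.append(f"{data[i + 1]}\n")
--         i += 2
--     return "".join(parts).rstrip("\n")
-- ===== Notes on version B (the rewrite author's own statement) =====
-- stated objective: faster
-- what changed: Replaced the enumerate loop with a per-index parity/last test and repeated string re-joining by a single pairwise pass over two-column rows that collects cells in a list and joins once, removing the quadratic string copying.
import Mathlib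
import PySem

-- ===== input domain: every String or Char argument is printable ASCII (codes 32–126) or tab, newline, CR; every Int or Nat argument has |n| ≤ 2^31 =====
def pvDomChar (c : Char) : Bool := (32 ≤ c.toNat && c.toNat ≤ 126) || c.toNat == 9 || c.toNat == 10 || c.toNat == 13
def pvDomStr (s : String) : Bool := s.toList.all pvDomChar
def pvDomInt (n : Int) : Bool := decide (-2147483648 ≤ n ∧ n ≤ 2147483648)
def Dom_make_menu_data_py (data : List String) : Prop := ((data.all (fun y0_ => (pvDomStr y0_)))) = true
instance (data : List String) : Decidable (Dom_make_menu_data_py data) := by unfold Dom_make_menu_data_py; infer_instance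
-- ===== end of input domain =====

-- B replaces the enumerate-and-parity branching plus repeated string re-joining by one
-- pairwise pass that collects the cells in a list and joins once (objective: faster join mechanism / simpler pass).

-- exact hand port of Python's format(text, "^w"): center in width w, extra space on the right
def pvCenter (w : Nat) (cs : List Char) : List Char :=
  if w ≤ cs.length then cs
  else
    let pad := w - cs.length
    let l := pad / 2
    List.replicate l ' ' ++ cs ++ List.replicate (pad - l) ' '

-- exact hand port of s.rstrip("\n"): drop trailing newline characters
def pvRstripNl (cs : List Char) : List Char := (cs.reverse.dropWhile (· == '\n')).reverse

-- ===== PORT A =====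
def make_menu_data_py (data : List String) : String :=
  let text :=
    (PySem.List.enumerate data 1).foldl
      (fun acc p =>
        if p.1 % 2 ≠ 0 ∧ p.1 = (data.length : Int) then acc ++ pvCenter 55 p.2.toList
        else if p.1 % 2 ≠ 0 then acc ++ pvCenter 35 p.2.toList
        else acc ++ (p.2.toList ++ ['\n'])) []
  String.mk (pvRstripNl text)

-- ===== PORT B =====
-- the pairwise pass of Source B: one step per two-column row, lone trailing item centred wide
def pvAltCells : List String → List (List Char)
  | [] => []
  | [x] => [pvCenter 55 x.toList]
  | x :: y :: rest => pvCenter 35 x.toList :: (y.toList ++ ['\n']) :: pvAltCells rest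

def make_menu_data_py_alt (data : List String) : String :=
  String.mk (pvRstripNl (pvAltCells data).flatten)

-- ===== PRECONDITION & SPEC =====
def Spec_make_menu_data_py (data : List String) (out : String) : Prop := out = make_menu_data_py_alt data
instance (data : List String) (out : String) : Decidable (Spec_make_menu_data_py data out) := by unfold Spec_make_menu_data_py; infer_instance

-- ===== CLAIM (what is proved, stated in full; the proofs are below) =====
def Claim_equal_make_menu_data_py : Prop := ∀ (data : List String), Dom_make_menu_data_py data → Spec_make_menu_data_py data (make_menu_data_py data)

-- ===== LEMMAS AND PROOFS =====

-- A's loop over the 1-based enumeration of a suffix starting at an odd index k,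
-- with n the index of the overall last element, yields exactly B's cells appended to acc.
theorem pvKey (n : Int) :
    ∀ (l : List String) (k : Int) (acc : List Char),
      k % 2 = 1 → n = k + l.length - 1 →
      (PySem.List.enumerate l k).foldl
        (fun acc p =>
          if p.1 % 2 ≠ 0 ∧ p.1 = n then acc ++ pvCenter 55 p.2.toList
          else if p.1 % 2 ≠ 0 then acc ++ pvCenter 35 p.2.toList
          else acc ++ (p.2.toList ++ ['\n'])) acc
        = acc ++ (pvAltCells l).flatten
  | [], k, acc, _, _ => by
      simp [PySem.List.enumerate, pvAltCells]
  | [x], k, acc, hk, hn => by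
      have hkn : k = n := by simp at hn; omega
      simp [PySem.List.enumerate_cons, PySem.List.enumerate_nil, pvAltCells, hkn.symm, hk]
  | x :: y :: rest, k, acc, hk, hn => by
      have h1 : ¬ (k % 2 ≠ 0 ∧ k = n) := by simp at hn ⊢; intro _; omega
      have h2 : ¬ ((k + 1) % 2 ≠ 0) := by omega
      rw [PySem.List.enumerate_cons, PySem.List.enumerate_cons]
      simp only [List.foldl_cons, if_neg h1, if_pos (show k % 2 ≠ 0 by omega), if_neg h2,
        if_neg (by simp [h2] : ¬ ((k + 1) % 2 ≠ 0 ∧ k + 1 = n))]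
      rw [pvKey n rest (k + 1 + 1) _ (by omega) (by simp at hn ⊢; omega)]
      simp [pvAltCells]

-- ===== VERDICT (by name: the statement is the Claim_ definition above) =====
theorem make_menu_data_py_spec : Claim_equal_make_menu_data_py := by
  intro data _
  unfold Spec_make_menu_data_py make_menu_data_py make_menu_data_py_alt
  rw [pvKey (data.length : Int) data 1 [] (by omega) (by omega)]
  simp
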